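-- pv_equiv track=rewrite | github.com/InnovativeInventor/shapefiles | openelections.py | normalize_vtdst
-- ===== SOURCE A (Python) =====
-- def normalize_vtdst(vtdst: str) -> str:
--     if isinstance(vtdst, int):
--         return str(vtdst)
--     else:
--         try:
--             return str(int(vtdst.rstrip()))
--         except:
--             if vtdst.rstrip().startswith("0"):
--                 return normalize_vtdst(vtdst.rstrip()[1:])
--             else:
--                 return vtdst.rstrip()
-- ===== SOURCE B (Python) =====
-- def normalize_vtdst(vtdst: str) -> str:
--     if isinstance(vtdst, int):
--         return str(vtdst)
--     s = vtdst.rstrip()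
--     for i in range(len(s) + 1):
--         t = s[i:]
--         try:
--             return str(int(t))
--         except ValueError:
--             if not t.startswith("0"):
--                 return t
--     return s  # unreachable: the i == len(s) iteration always returns
-- ===== Notes on version B (the rewrite author's own statement) =====
-- stated objective: simpler
-- what changed: Replaces the self-recursion that re-rstrips the string on every call with a single upfront rstrip followed by an index loop over suffixes s[i:], attempting int() at each and returning the first suffix that is int-convertible or does not begin with a zero digit.
import Mathlib
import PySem

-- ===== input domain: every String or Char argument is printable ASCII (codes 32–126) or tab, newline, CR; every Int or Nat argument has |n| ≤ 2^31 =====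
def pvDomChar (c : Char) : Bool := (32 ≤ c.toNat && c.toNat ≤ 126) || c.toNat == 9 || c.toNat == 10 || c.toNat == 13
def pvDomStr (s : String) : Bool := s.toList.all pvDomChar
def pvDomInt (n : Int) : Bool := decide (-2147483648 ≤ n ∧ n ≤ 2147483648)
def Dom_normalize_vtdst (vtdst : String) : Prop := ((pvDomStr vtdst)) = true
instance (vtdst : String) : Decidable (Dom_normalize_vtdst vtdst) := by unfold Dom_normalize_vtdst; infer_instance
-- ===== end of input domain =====

-- B replaces A's recursion (which re-rstrips on every call) by one rstrip and an index loop
-- over suffixes; same return value everywhere, no speed claim.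

-- ===== PORT A =====
-- termination helper for the port's recursion (cited in decreasing_by)
theorem pvRstripLen (cs : List Char) :
    (PySem.Chars.rstrip cs).length ≤ cs.length := by
  simp only [PySem.Chars.rstrip, List.length_reverse]
  exact le_trans (List.length_dropWhile_le _ _) (by simp)

-- A's `isinstance(vtdst, int)` branch is dead for a str argument and is omitted.
-- str(int(x.rstrip())) → ofChars?/toChars (the bare except catches exactly int's ValueError);
-- x.rstrip()[1:] on a Nat-indexed list is `.drop 1` (exact for the slice [1:]).
def normalizeVtdstA (cs : List Char) : List Char :=
  match PySem.Int.ofChars? (PySem.Chars.rstrip cs) with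
  | some n => PySem.Int.toChars n
  | none =>
    if PySem.Chars.startswith (PySem.Chars.rstrip cs) ['0'] then
      normalizeVtdstA ((PySem.Chars.rstrip cs).drop 1)
    else
      PySem.Chars.rstrip cs
termination_by cs.length
decreasing_by
  rename_i h
  have hne : PySem.Chars.rstrip cs ≠ [] := by
    intro hnil; rw [hnil] at h; simp [PySem.Chars.startswith] at h
  have h1 : 1 ≤ (PySem.Chars.rstrip cs).length := List.length_pos_of_ne_nil hne
  have := pvRstripLen cs
  simp only [List.length_drop]; omega

def normalize_vtdst (vtdst : String) : String :=
  String.mk (normalizeVtdstA vtdst.toList)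

-- ===== PORT B =====
-- the `for i in range(len(s)+1)` loop with early returns; t = s[i:] is `.drop i` (i ≥ 0)
def normalizeVtdstAltGo (s : List Char) : List Nat → List Char
  | [] => s          -- falling off the loop: unreachable (the i = len(s) iteration returns)
  | i :: is =>
    let t := s.drop i
    match PySem.Int.ofChars? t with
    | some n => PySem.Int.toChars n
    | none =>
      if PySem.Chars.startswith t ['0'] then normalizeVtdstAltGo s is
      else t

def normalize_vtdst_alt (vtdst : String) : String :=
  let s := PySem.Chars.rstrip vtdst.toList
  String.mk (normalizeVtdstAltGo s (List.range (s.length + 1)))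

-- ===== PRECONDITION & SPEC =====
def Spec_normalize_vtdst (vtdst : String) (out : String) : Prop := out = normalize_vtdst_alt vtdst
instance (vtdst : String) (out : String) : Decidable (Spec_normalize_vtdst vtdst out) := by unfold Spec_normalize_vtdst; infer_instance

-- ===== CLAIM (what is proved, stated in full; the proofs are below) =====
def Claim_equal_normalize_vtdst : Prop := ∀ (vtdst : String), Dom_normalize_vtdst vtdst → Spec_normalize_vtdst vtdst (normalize_vtdst vtdst)

-- ===== LEMMAS AND PROOFS =====

theorem pvDropWhileFixedTake {p : Char → Bool} :
    ∀ (l : List Char) (m : Nat), List.dropWhile p l = l →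
      List.dropWhile p (l.take m) = l.take m := by
  intro l m h
  cases l with
  | nil => simp
  | cons a l =>
    cases m with
    | zero => simp
    | succ m =>
      have ha : p a = false := by
        cases hpa : p a
        · rfl
        · exfalso
          simp only [List.dropWhile_cons, hpa, if_true] at h
          have h2 := congrArg List.length h
          have := List.length_dropWhile_le p l
          simp at h2; omega
      simp [ha]

theorem pvRstripFixedDrop (r : List Char) (h : PySem.Chars.rstrip r = r) (k : Nat) :
    PySem.Chars.rstrip (r.drop k) = r.drop k := by
  have h' : List.dropWhile PySem.Chars.isspace r.reverse = r.reverse := by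
    have := congrArg List.reverse h
    simpa [PySem.Chars.rstrip] using this
  have hrev : (r.drop k).reverse = r.reverse.take (r.length - k) := by
    simp [List.reverse_drop]
  simp only [PySem.Chars.rstrip, hrev, pvDropWhileFixedTake _ _ h']
  simp [← hrev]

theorem pvDropWhileIdem {p : Char → Bool} (l : List Char) :
    List.dropWhile p (List.dropWhile p l) = List.dropWhile p l := by
  induction l with
  | nil => simp
  | cons a l ih =>
    by_cases hpa : p a = true
    · simpa [List.dropWhile_cons, hpa] using ih
    · simp at hpa; simp [hpa]

theorem pvRstripIdem (cs : List Char) :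
    PySem.Chars.rstrip (PySem.Chars.rstrip cs) = PySem.Chars.rstrip cs := by
  simp [PySem.Chars.rstrip, pvDropWhileIdem]

theorem pvStartsNe (t : List Char) (h : PySem.Chars.startswith t ['0'] = true) : t ≠ [] := by
  intro hnil; rw [hnil] at h; simp [PySem.Chars.startswith] at h

theorem pvMain : ∀ (n : Nat) (r : List Char) (i : Nat),
    PySem.Chars.rstrip r = r → i ≤ r.length → n = r.length + 1 - i →
    normalizeVtdstAltGo r (List.range' i n) = normalizeVtdstA (r.drop i) := by
  intro n
  induction n with
  | zero => intro r i _ hi hn; omega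
  | succ m ih =>
    intro r i hfix hi hn
    have hfixd : PySem.Chars.rstrip (r.drop i) = r.drop i := pvRstripFixedDrop r hfix i
    rw [List.range'_succ, normalizeVtdstA]
    simp only [normalizeVtdstAltGo, hfixd]
    cases hof : PySem.Int.ofChars? (r.drop i) with
    | some k => simp
    | none =>
      simp only
      by_cases hsw : PySem.Chars.startswith (r.drop i) ['0'] = true
      · have hne : r.drop i ≠ [] := pvStartsNe _ hsw
        have hlt : i < r.length := by
          by_contra hge
          exact hne (List.drop_eq_nil_of_le (by omega))
        rw [if_pos hsw, if_pos hsw, List.drop_drop]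
        have := ih r (i + 1) hfix (by omega) (by omega)
        simpa [Nat.add_comm 1 i] using this
      · rw [if_neg hsw, if_neg hsw]

theorem pvA_rstrip (cs : List Char) :
    normalizeVtdstA cs = normalizeVtdstA (PySem.Chars.rstrip cs) := by
  conv_lhs => rw [normalizeVtdstA]
  conv_rhs => rw [normalizeVtdstA]
  rw [pvRstripIdem]

-- ===== VERDICT (by name: the statement is the Claim_ definition above) =====
theorem normalize_vtdst_spec : Claim_equal_normalize_vtdst := by
  intro vtdst _
  unfold Spec_normalize_vtdst normalize_vtdst normalize_vtdst_alt
  have key := pvMain ((PySem.Chars.rstrip vtdst.toList).length + 1)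
      (PySem.Chars.rstrip vtdst.toList) 0 (pvRstripIdem _) (Nat.zero_le _) (by omega)
  simp only [List.drop_zero] at key
  simp only [List.range_eq_range', key, ← pvA_rstrip]
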